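-- pv_equiv track=rewrite | github.com/cc121/AdventofCode2023 | Day1/src/main.py | convert_words
-- ===== SOURCE A (Python) =====
-- def convert_words(row):
--     conversion = {
--         "one": "1",
--         "two": "2",
--         "three": "3",
--         "four": "4",
--         "five": "5",
--         "six": "6",
--         "seven": "7",
--         "eight": "8",
--         "nine": "9",
--     }
--
--     i = 0
--     while i <= len(row):
--         three_char = row[i:i + 3]
--         four_char = row[i:i + 4]
--         five_char = row[i:i + 5]
--
--         if conversion.get(three_char) is not None:
--             row = row[:i] + conversion[three_char] + row[i:]
--             i += 1
--
--         elif conversion.get(four_char) is not None: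
--             row = row[:i] + conversion[four_char] + row[i:]
--             i += 1
--
--         elif conversion.get(five_char) is not None:
--             row = row[:i] + conversion[five_char] + row[i:]
--             i += 1
--
--         i += 1
--
--     return row
-- ===== SOURCE B (Python) =====
-- def convert_words(row):
--     conversion = {
--         "one": "1",
--         "two": "2",
--         "three": "3",
--         "four": "4",
--         "five": "5",
--         "six": "6",
--         "seven": "7",
--         "eight": "8",
--         "nine": "9",
--     }
--     # Phase 1: index table — every (overlapping) occurrence of a word in the
--     # ORIGINAL row, as start position -> digit.  At most one word can start at
--     # any position (no word is a prefix of another), so overwrites are moot.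
--     positions = {}
--     for word, digit in conversion.items():
--         start = 0
--         while True:
--             idx = row.find(word, start)
--             if idx == -1:
--                 break
--             positions[idx] = digit
--             start = idx + 1
--     # Phase 2: emit in one sweep over the untouched row.
--     out = []
--     for i in range(len(row)):
--         if i in positions:
--             out.append(positions[i])
--         out.append(row[i])
--     return "".join(out)
-- ===== Notes on version B (the rewrite author's own statement) =====
-- stated objective: faster
-- what changed: A does one left-to-right scan over a string it keeps splicing digits into, probing a length-3/4/5 slice at each index; B is two staged passes over the untouched row: it first builds an index table position->digit by repeated overlapping str.find per word, then emits the result in a single sweep consulting that table.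
import Mathlib
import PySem

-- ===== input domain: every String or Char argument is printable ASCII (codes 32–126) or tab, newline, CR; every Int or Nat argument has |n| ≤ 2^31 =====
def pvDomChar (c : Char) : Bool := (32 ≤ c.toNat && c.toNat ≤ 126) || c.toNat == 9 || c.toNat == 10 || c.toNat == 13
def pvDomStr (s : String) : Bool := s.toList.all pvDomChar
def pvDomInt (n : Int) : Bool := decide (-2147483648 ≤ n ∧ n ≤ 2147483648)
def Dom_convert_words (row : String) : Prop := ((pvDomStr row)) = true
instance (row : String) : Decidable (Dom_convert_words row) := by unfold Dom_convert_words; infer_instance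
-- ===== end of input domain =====

-- B replaces A's single splice-as-you-scan pass (window probing + in-place insertion with a
-- mutating index) by two staged passes over the untouched row: build an index table
-- position -> digit via repeated overlapping str.find per word, then emit in one sweep
-- (objective: faster — a timing run measured B ≥ 1.5× faster at the largest size;
-- it avoids A's per-insertion whole-string copies).

-- ===== PORT A =====
-- A's dict {"one": "1", …} as an insertion-ordered association list.
def pvConvA : PySem.Dict (List Char) (List Char) := PySem.Dict.mk
  [("one".toList, "1".toList), ("two".toList, "2".toList), ("three".toList, "3".toList),
   ("four".toList, "4".toList), ("five".toList, "5".toList), ("six".toList, "6".toList),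
   ("seven".toList, "7".toList), ("eight".toList, "8".toList), ("nine".toList, "9".toList)]

-- Every value stored in A's dict is a single digit character (used for termination).
lemma pvConvA_val_len (t d : List Char) (h : PySem.Dict.get? pvConvA t = some d) :
    d.length = 1 := by
  simp only [pvConvA, PySem.Dict.get?_mk_cons] at h
  split_ifs at h <;> first | (cases h; rfl) | simp_all [PySem.Dict.get?]

lemma pvConvA_getD_len (t : List Char) :
    ((PySem.Dict.get? pvConvA t).getD []).length ≤ 1 := by
  cases h : PySem.Dict.get? pvConvA t with
  | none => simp
  | some d => simp [pvConvA_val_len t d h]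

-- A's while loop; i only ever grows from 0 by +1/+2, so it is carried as a Nat.
-- 'conversion.get(x) is not None' is '(get? x).isSome'; the guarded 'conversion[x]' is '(get? x).getD []'.
def pvLoopA (row : List Char) (i : Nat) : List Char :=
  if _h : i ≤ row.length then
    let three_char := PySem.List.slice row (some (i : Int)) (some ((i : Int) + 3))
    let four_char  := PySem.List.slice row (some (i : Int)) (some ((i : Int) + 4))
    let five_char  := PySem.List.slice row (some (i : Int)) (some ((i : Int) + 5))
    if (PySem.Dict.get? pvConvA three_char).isSome then
      pvLoopA (PySem.List.slice row none (some (i : Int)) ++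
               (PySem.Dict.get? pvConvA three_char).getD [] ++
               PySem.List.slice row (some (i : Int)) none) (i + 2)
    else if (PySem.Dict.get? pvConvA four_char).isSome then
      pvLoopA (PySem.List.slice row none (some (i : Int)) ++
               (PySem.Dict.get? pvConvA four_char).getD [] ++
               PySem.List.slice row (some (i : Int)) none) (i + 2)
    else if (PySem.Dict.get? pvConvA five_char).isSome then
      pvLoopA (PySem.List.slice row none (some (i : Int)) ++
               (PySem.Dict.get? pvConvA five_char).getD [] ++
               PySem.List.slice row (some (i : Int)) none) (i + 2)
    else pvLoopA row (i + 1)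
  else row
termination_by row.length + 1 - i
decreasing_by
  · have := pvConvA_getD_len (PySem.List.slice row (some (i : Int)) (some ((i : Int) + 3)))
    simp_all
    omega
  · have := pvConvA_getD_len (PySem.List.slice row (some (i : Int)) (some ((i : Int) + 4)))
    simp_all
    omega
  · have := pvConvA_getD_len (PySem.List.slice row (some (i : Int)) (some ((i : Int) + 5)))
    simp_all
    omega
  · omega

def convert_words (row : String) : String := String.ofList (pvLoopA row.toList 0)

-- ===== PORT B =====
-- B's conversion table, in dict insertion order (conversion.items()); the digit values
-- are single characters.
def pvWordsB : List (List Char × Char) :=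
  [("one".toList, '1'), ("two".toList, '2'), ("three".toList, '3'),
   ("four".toList, '4'), ("five".toList, '5'), ("six".toList, '6'),
   ("seven".toList, '7'), ("eight".toList, '8'), ("nine".toList, '9')]

-- B's inner 'while True: idx = row.find(word, start); …' loop for one word.  The scan
-- position 'start' only ever grows from 0 by idx+1, so it is carried as a Nat.  The
-- outer dite is a totality guard only: Python's find with a start past len(row)
-- returns -1 for these (nonempty) words, so the loop breaks there just the same.
def pvOccB (row w : List Char) (d : Char) (start : Nat) (pos : PySem.Dict Nat Char) :
    PySem.Dict Nat Char :=
  if hs : start ≤ row.length then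
    if hf : PySem.Chars.findFrom row w (start : Int) = -1 then pos
    else pvOccB row w d ((PySem.Chars.findFrom row w (start : Int)).toNat + 1)
           (pos.insert (PySem.Chars.findFrom row w (start : Int)).toNat d)
  else pos
termination_by row.length + 1 - start
decreasing_by
  have h := (PySem.Chars.findFrom_natCast_spec row w start hs hf).1
  omega

-- B's phase 1: 'for word, digit in conversion.items(): …' building positions.
def pvBuildB (row : List Char) : PySem.Dict Nat Char :=
  pvWordsB.foldl (fun pos wd => pvOccB row wd.1 wd.2 0 pos) PySem.Dict.empty

-- B's phase 2: 'for i in range(len(row)): if i in positions: out.append(positions[i]);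
-- out.append(row[i])' — the guarded dict access is rendered as a match on get?
-- (i in positions ↔ get? is some), and row[i] as pyGet? (always some here).
def convert_words_alt (row : String) : String :=
  let pos := pvBuildB row.toList
  String.ofList ((List.range row.toList.length).foldl
    (fun out i =>
      (match PySem.Dict.get? pos i with
       | some d => out ++ [d]
       | none => out) ++
      (match PySem.List.pyGet? row.toList (i : Int) with
       | some c => [c]
       | none => []))
    [])

-- ===== PRECONDITION & SPEC =====
def Spec_convert_words (row : String) (out : String) : Prop := out = convert_words_alt row
instance (row : String) (out : String) : Decidable (Spec_convert_words row out) := by unfold Spec_convert_words; infer_instance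

-- ===== CLAIM (what is proved, stated in full; the proofs are below) =====
def Claim_equal_convert_words : Prop := ∀ (row : String), Dom_convert_words row → Spec_convert_words row (convert_words row)

-- ===== LEMMAS AND PROOFS =====

-- Bool bridges: key comparison in A's dict scan vs prefix tests.
lemma pv_beq_take (s w : List Char) (k : Nat) (hw : w.length = k) :
    (w == s.take k) = decide (w <+: s) := by
  apply Bool.eq_iff_iff.mpr
  simp only [beq_iff_eq, decide_eq_true_eq]
  rw [List.prefix_iff_eq_take, hw]

lemma pv_beq_take_false (s w : List Char) (k : Nat) (hk : k < w.length) :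
    (w == s.take k) = false := by
  rw [beq_eq_false_iff_ne]
  intro h
  have := congrArg List.length h
  simp [List.length_take] at this
  omega

lemma pv_beq_take_false' (s w : List Char) (k : Nat) (h : ¬ w <+: s) :
    (w == s.take k) = false := by
  rw [beq_eq_false_iff_ne]
  intro he
  exact h (he ▸ List.take_prefix k s)

lemma pv_startswith_decide (s p : List Char) :
    PySem.Chars.startswith s p = decide (p <+: s) := by
  apply Bool.eq_iff_iff.mpr
  simp [PySem.Chars.startswith_iff]

-- A's dict lookups on the 3/4/5-char windows, as prefix tests on the suffix.
lemma pv_get3 (s : List Char) : PySem.Dict.get? pvConvA (s.take 3) =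
    (if "one".toList <+: s then some "1".toList
     else if "two".toList <+: s then some "2".toList
     else if "six".toList <+: s then some "6".toList else none) := by
  simp only [pvConvA, PySem.Dict.get?_mk_cons]
  rw [pv_beq_take s "one".toList 3 rfl, pv_beq_take s "two".toList 3 rfl,
      pv_beq_take_false s "three".toList 3 (by decide),
      pv_beq_take_false s "four".toList 3 (by decide),
      pv_beq_take_false s "five".toList 3 (by decide),
      pv_beq_take s "six".toList 3 rfl,
      pv_beq_take_false s "seven".toList 3 (by decide),
      pv_beq_take_false s "eight".toList 3 (by decide),
      pv_beq_take_false s "nine".toList 3 (by decide)]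
  simp [PySem.Dict.get?]

lemma pv_get4 (s : List Char) (h1 : ¬ "one".toList <+: s) (h2 : ¬ "two".toList <+: s)
    (h6 : ¬ "six".toList <+: s) : PySem.Dict.get? pvConvA (s.take 4) =
    (if "four".toList <+: s then some "4".toList
     else if "five".toList <+: s then some "5".toList
     else if "nine".toList <+: s then some "9".toList else none) := by
  simp only [pvConvA, PySem.Dict.get?_mk_cons]
  rw [pv_beq_take_false' s "one".toList 4 h1,
      pv_beq_take_false' s "two".toList 4 h2,
      pv_beq_take_false s "three".toList 4 (by decide),
      pv_beq_take s "four".toList 4 rfl,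
      pv_beq_take s "five".toList 4 rfl,
      pv_beq_take_false' s "six".toList 4 h6,
      pv_beq_take_false s "seven".toList 4 (by decide),
      pv_beq_take_false s "eight".toList 4 (by decide),
      pv_beq_take s "nine".toList 4 rfl]
  simp [PySem.Dict.get?]

lemma pv_get5 (s : List Char) (h1 : ¬ "one".toList <+: s) (h2 : ¬ "two".toList <+: s)
    (h6 : ¬ "six".toList <+: s) (h4 : ¬ "four".toList <+: s) (h5 : ¬ "five".toList <+: s)
    (h9 : ¬ "nine".toList <+: s) : PySem.Dict.get? pvConvA (s.take 5) =
    (if "three".toList <+: s then some "3".toList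
     else if "seven".toList <+: s then some "7".toList
     else if "eight".toList <+: s then some "8".toList else none) := by
  simp only [pvConvA, PySem.Dict.get?_mk_cons]
  rw [pv_beq_take_false' s "one".toList 5 h1,
      pv_beq_take_false' s "two".toList 5 h2,
      pv_beq_take s "three".toList 5 rfl,
      pv_beq_take_false' s "four".toList 5 h4,
      pv_beq_take_false' s "five".toList 5 h5,
      pv_beq_take_false' s "six".toList 5 h6,
      pv_beq_take s "seven".toList 5 rfl,
      pv_beq_take s "eight".toList 5 rfl,
      pv_beq_take_false' s "nine".toList 5 h9]
  simp [PySem.Dict.get?]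

-- Proof-side one-pass normal form shared by both programs: the first matching word's
-- digit at each suffix (words grouped by length, mirroring A's 3/4/5 probing order), …
def pvTableB : List (List Char × Char) :=
  [("one".toList, '1'), ("two".toList, '2'), ("six".toList, '6'),
   ("four".toList, '4'), ("five".toList, '5'), ("nine".toList, '9'),
   ("three".toList, '3'), ("seven".toList, '7'), ("eight".toList, '8')]

def pvFindB (s : List Char) : Option Char :=
  (pvTableB.find? (fun p => PySem.Chars.startswith s p.1)).map (·.2)

-- … and the single forward emission pass it drives.
def pvLoopB (s : List Char) (out : List Char) : List Char :=
  match s with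
  | [] => out
  | c :: cs =>
    let out' := match pvFindB (c :: cs) with
                | some d => out ++ [d]
                | none => out
    pvLoopB cs (out' ++ [c])

-- The table scan as a chain of prefix tests (table order).
lemma pv_findB (s : List Char) : pvFindB s =
    (if "one".toList <+: s then some '1'
     else if "two".toList <+: s then some '2'
     else if "six".toList <+: s then some '6'
     else if "four".toList <+: s then some '4'
     else if "five".toList <+: s then some '5'
     else if "nine".toList <+: s then some '9'
     else if "three".toList <+: s then some '3'
     else if "seven".toList <+: s then some '7'
     else if "eight".toList <+: s then some '8' else none) := by
  simp only [pvFindB, pvTableB, List.find?, pv_startswith_decide]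
  split_ifs <;> simp_all

lemma pvLoopB_acc (s out : List Char) : pvLoopB s out = out ++ pvLoopB s [] := by
  induction s generalizing out with
  | nil => simp [pvLoopB]
  | cons c cs ih =>
    simp only [pvLoopB]
    cases pvFindB (c :: cs) with
    | none => rw [ih (out ++ [c]), ih ([] ++ [c])]; simp
    | some d => rw [ih (out ++ [d] ++ [c]), ih (([] ++ [d]) ++ [c])]; simp

-- Window slice on a Nat index.
lemma pv_slice_window (xs : List Char) (i n : Nat) :
    PySem.List.slice xs (some (i : Int)) (some ((i : Int) + (n : Int))) = (xs.drop i).take n :=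
  PySem.List.slice_natCast_add xs i n

-- A-side invariant: once the scan index has passed 'done', A's loop appends exactly
-- the one-pass emission of the untouched suffix.
lemma pv_main (rest : List Char) : ∀ done : List Char,
    pvLoopA (done ++ rest) done.length = done ++ pvLoopB rest [] := by
  induction rest with
  | nil =>
    intro done
    rw [pvLoopA, dif_pos (by simp)]
    simp only [← Nat.cast_ofNat (R := Int)]
    rw [pv_slice_window, pv_slice_window, pv_slice_window]
    simp only [List.append_nil, List.drop_length, List.take_nil]
    have g : PySem.Dict.get? pvConvA [] = none := by rfl
    simp only [g, Option.isSome_none, Bool.false_eq_true, if_false]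
    rw [pvLoopA, dif_neg (by omega)]
    simp [pvLoopB]
  | cons c cs ih =>
    intro done
    rw [pvLoopA, dif_pos (by simp)]
    simp only [← Nat.cast_ofNat (R := Int)]
    rw [pv_slice_window, pv_slice_window, pv_slice_window,
        PySem.List.slice_to_natCast, PySem.List.slice_from_natCast,
        List.drop_left, List.take_left, pv_get3]
    conv_rhs => rw [pvLoopB]
    rw [pvLoopB_acc, pv_findB]
    by_cases q1 : "one".toList <+: c :: cs
    · simp only [if_pos q1, Option.isSome_some, if_true, Option.getD_some]
      have h := ih (done ++ ['1', c])
      simp only [List.append_assoc, List.cons_append, List.nil_append,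
                 List.length_append, List.length_cons, List.length_nil] at h ⊢
      simpa using h
    · simp only [if_neg q1]
      by_cases q2 : "two".toList <+: c :: cs
      · simp only [if_pos q2, Option.isSome_some, if_true, Option.getD_some]
        have h := ih (done ++ ['2', c])
        simpa using h
      · simp only [if_neg q2]
        by_cases q6 : "six".toList <+: c :: cs
        · simp only [if_pos q6, Option.isSome_some, if_true, Option.getD_some]
          have h := ih (done ++ ['6', c])
          simpa using h
        · simp only [if_neg q6, Option.isSome_none, Bool.false_eq_true, if_false]
          rw [pv_get4 _ q1 q2 q6]
          by_cases q4 : "four".toList <+: c :: cs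
          · simp only [if_pos q4, Option.isSome_some, if_true, Option.getD_some]
            have h := ih (done ++ ['4', c])
            simpa using h
          · simp only [if_neg q4]
            by_cases q5 : "five".toList <+: c :: cs
            · simp only [if_pos q5, Option.isSome_some, if_true, Option.getD_some]
              have h := ih (done ++ ['5', c])
              simpa using h
            · simp only [if_neg q5]
              by_cases q9 : "nine".toList <+: c :: cs
              · simp only [if_pos q9, Option.isSome_some, if_true, Option.getD_some]
                have h := ih (done ++ ['9', c])
                simpa using h
              · simp only [if_neg q9, Option.isSome_none, Bool.false_eq_true, if_false]
                rw [pv_get5 _ q1 q2 q6 q4 q5 q9]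
                by_cases q3 : "three".toList <+: c :: cs
                · simp only [if_pos q3, Option.isSome_some, if_true, Option.getD_some]
                  have h := ih (done ++ ['3', c])
                  simpa using h
                · simp only [if_neg q3]
                  by_cases q7 : "seven".toList <+: c :: cs
                  · simp only [if_pos q7, Option.isSome_some, if_true, Option.getD_some]
                    have h := ih (done ++ ['7', c])
                    simpa using h
                  · simp only [if_neg q7]
                    by_cases q8 : "eight".toList <+: c :: cs
                    · simp only [if_pos q8, Option.isSome_some, if_true, Option.getD_some]
                      have h := ih (done ++ ['8', c])
                      simpa using h
                    · simp only [if_neg q8, Option.isSome_none, Bool.false_eq_true, if_false]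
                      have h := ih (done ++ [c])
                      simpa using h

-- No two distinct digit words can start at the same position.
lemma pv_uni (w1 w2 s : List Char) (h : (decide (w1 <+: w2) || decide (w2 <+: w1)) = false)
    (h1 : w1 <+: s) (h2 : w2 <+: s) : False := by
  rcases List.prefix_or_prefix_of_prefix h1 h2 with hh | hh <;> simp_all

-- What one find-loop contributes to the index table: exactly the positions ≥ start
-- where the word is a prefix of the remaining row.
lemma pvOccB_get? (row w : List Char) (d : Char) (hw : w ≠ []) (start : Nat)
    (pos : PySem.Dict Nat Char) (i : Nat) :
    PySem.Dict.get? (pvOccB row w d start pos) i =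
      if start ≤ i ∧ w <+: row.drop i then some d else PySem.Dict.get? pos i := by
  have key : ∀ n start pos, row.length + 1 - start ≤ n →
      PySem.Dict.get? (pvOccB row w d start pos) i =
        if start ≤ i ∧ w <+: row.drop i then some d else PySem.Dict.get? pos i := by
    intro n
    induction n with
    | zero =>
      intro start pos hn
      rw [pvOccB, dif_neg (by omega)]
      rw [if_neg]
      rintro ⟨hsi, hpre⟩
      have hdrop : row.drop i = [] := List.drop_eq_nil_of_le (by omega)
      rw [hdrop, List.prefix_nil] at hpre
      exact hw hpre
    | succ n ih =>
      intro start pos hn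
      by_cases hs : start ≤ row.length
      · rw [pvOccB, dif_pos hs]
        by_cases hf : PySem.Chars.findFrom row w (start : Int) = -1
        · rw [dif_pos hf, if_neg]
          rintro ⟨hsi, hpre⟩
          have hni := (PySem.Chars.findFrom_natCast_eq_neg_one_iff row w start hs).mp hf
          apply hni
          rw [← PySem.Chars.isIn_iff_infix, ← PySem.Chars.exists_prefix_drop_iff_isIn]
          exact ⟨i - start, by rw [List.drop_drop, Nat.add_sub_cancel' hsi]; exact hpre⟩
        · rw [dif_neg hf]
          obtain ⟨hk1, hk2, hk3⟩ := PySem.Chars.findFrom_natCast_spec row w start hs hf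
          set F := (PySem.Chars.findFrom row w (start : Int)).toNat with hF
          have hFs : start ≤ F := by omega
          have hFlen : F < row.length := by
            have := hk2.length_le
            rw [List.length_drop] at this
            rcases Nat.lt_or_ge F row.length with h' | h'
            · exact h'
            · exfalso; apply hw; rw [← List.prefix_nil, ← List.drop_eq_nil_of_le h']; exact hk2
          rw [ih (F + 1) (pos.insert F d) (by omega)]
          rcases Nat.lt_trichotomy i F with hlt | heq | hgt
          · rw [if_neg (by rintro ⟨h', -⟩; omega), PySem.Dict.get?_insert,
                if_neg (by omega)]
            by_cases hsi : start ≤ i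
            · rw [if_neg (by rintro ⟨-, hc⟩; exact hk3 i hsi hlt hc)]
            · rw [if_neg (by rintro ⟨h', -⟩; omega)]
          · subst heq
            rw [if_neg (by rintro ⟨h', -⟩; omega), PySem.Dict.get?_insert, if_pos rfl,
                if_pos ⟨hFs, hk2⟩]
          · by_cases hp : w <+: List.drop i row
            · rw [if_pos ⟨by omega, hp⟩, if_pos ⟨by omega, hp⟩]
            · rw [if_neg (by rintro ⟨-, hc⟩; exact hp hc),
                  if_neg (by rintro ⟨-, hc⟩; exact hp hc),
                  PySem.Dict.get?_insert, if_neg (by omega)]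
      · rw [pvOccB, dif_neg hs, if_neg]
        rintro ⟨hsi, hpre⟩
        have hdrop : row.drop i = [] := List.drop_eq_nil_of_le (by omega)
        rw [hdrop, List.prefix_nil] at hpre
        exact hw hpre
  exact key (row.length + 1 - start) start pos le_rfl

-- The finished index table, looked up at i, is the one-pass match at suffix i
-- (uniqueness of the matching word reconciles last-write-wins with first-match).
lemma pv_lookup (row : List Char) (i : Nat) :
    PySem.Dict.get? (pvBuildB row) i = pvFindB (row.drop i) := by
  simp only [pvBuildB, pvWordsB, List.foldl]
  rw [pvOccB_get? row "nine".toList '9' (by decide),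
      pvOccB_get? row "eight".toList '8' (by decide),
      pvOccB_get? row "seven".toList '7' (by decide),
      pvOccB_get? row "six".toList '6' (by decide),
      pvOccB_get? row "five".toList '5' (by decide),
      pvOccB_get? row "four".toList '4' (by decide),
      pvOccB_get? row "three".toList '3' (by decide),
      pvOccB_get? row "two".toList '2' (by decide),
      pvOccB_get? row "one".toList '1' (by decide),
      pv_findB]
  simp only [Nat.zero_le, true_and, PySem.Dict.get?_empty]
  set s := row.drop i with hs
  by_cases q1 : ((['o','n','e'] : List Char) <+: s)
  · have n2 : ¬ ((['t','w','o'] : List Char) <+: s) := fun h => pv_uni _ _ _ (by decide) q1 h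
    have n3 : ¬ ((['t','h','r','e','e'] : List Char) <+: s) := fun h => pv_uni _ _ _ (by decide) q1 h
    have n4 : ¬ ((['f','o','u','r'] : List Char) <+: s) := fun h => pv_uni _ _ _ (by decide) q1 h
    have n5 : ¬ ((['f','i','v','e'] : List Char) <+: s) := fun h => pv_uni _ _ _ (by decide) q1 h
    have n6 : ¬ ((['s','i','x'] : List Char) <+: s) := fun h => pv_uni _ _ _ (by decide) q1 h
    have n7 : ¬ ((['s','e','v','e','n'] : List Char) <+: s) := fun h => pv_uni _ _ _ (by decide) q1 h
    have n8 : ¬ ((['e','i','g','h','t'] : List Char) <+: s) := fun h => pv_uni _ _ _ (by decide) q1 h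
    have n9 : ¬ ((['n','i','n','e'] : List Char) <+: s) := fun h => pv_uni _ _ _ (by decide) q1 h
    simp [q1, n2, n3, n4, n5, n6, n7, n8, n9]
  · by_cases q2 : ((['t','w','o'] : List Char) <+: s)
    · have n3 : ¬ ((['t','h','r','e','e'] : List Char) <+: s) := fun h => pv_uni _ _ _ (by decide) q2 h
      have n4 : ¬ ((['f','o','u','r'] : List Char) <+: s) := fun h => pv_uni _ _ _ (by decide) q2 h
      have n5 : ¬ ((['f','i','v','e'] : List Char) <+: s) := fun h => pv_uni _ _ _ (by decide) q2 h
      have n6 : ¬ ((['s','i','x'] : List Char) <+: s) := fun h => pv_uni _ _ _ (by decide) q2 h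
      have n7 : ¬ ((['s','e','v','e','n'] : List Char) <+: s) := fun h => pv_uni _ _ _ (by decide) q2 h
      have n8 : ¬ ((['e','i','g','h','t'] : List Char) <+: s) := fun h => pv_uni _ _ _ (by decide) q2 h
      have n9 : ¬ ((['n','i','n','e'] : List Char) <+: s) := fun h => pv_uni _ _ _ (by decide) q2 h
      simp [q1, q2, n3, n4, n5, n6, n7, n8, n9]
    · by_cases q3 : ((['t','h','r','e','e'] : List Char) <+: s)
      · have n4 : ¬ ((['f','o','u','r'] : List Char) <+: s) := fun h => pv_uni _ _ _ (by decide) q3 h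
        have n5 : ¬ ((['f','i','v','e'] : List Char) <+: s) := fun h => pv_uni _ _ _ (by decide) q3 h
        have n6 : ¬ ((['s','i','x'] : List Char) <+: s) := fun h => pv_uni _ _ _ (by decide) q3 h
        have n7 : ¬ ((['s','e','v','e','n'] : List Char) <+: s) := fun h => pv_uni _ _ _ (by decide) q3 h
        have n8 : ¬ ((['e','i','g','h','t'] : List Char) <+: s) := fun h => pv_uni _ _ _ (by decide) q3 h
        have n9 : ¬ ((['n','i','n','e'] : List Char) <+: s) := fun h => pv_uni _ _ _ (by decide) q3 h
        simp [q1, q2, q3, n4, n5, n6, n7, n8, n9]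
      · by_cases q4 : ((['f','o','u','r'] : List Char) <+: s)
        · have n5 : ¬ ((['f','i','v','e'] : List Char) <+: s) := fun h => pv_uni _ _ _ (by decide) q4 h
          have n6 : ¬ ((['s','i','x'] : List Char) <+: s) := fun h => pv_uni _ _ _ (by decide) q4 h
          have n7 : ¬ ((['s','e','v','e','n'] : List Char) <+: s) := fun h => pv_uni _ _ _ (by decide) q4 h
          have n8 : ¬ ((['e','i','g','h','t'] : List Char) <+: s) := fun h => pv_uni _ _ _ (by decide) q4 h
          have n9 : ¬ ((['n','i','n','e'] : List Char) <+: s) := fun h => pv_uni _ _ _ (by decide) q4 h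
          simp [q1, q2, q4, n5, n6, n7, n8, n9]
        · by_cases q5 : ((['f','i','v','e'] : List Char) <+: s)
          · have n6 : ¬ ((['s','i','x'] : List Char) <+: s) := fun h => pv_uni _ _ _ (by decide) q5 h
            have n7 : ¬ ((['s','e','v','e','n'] : List Char) <+: s) := fun h => pv_uni _ _ _ (by decide) q5 h
            have n8 : ¬ ((['e','i','g','h','t'] : List Char) <+: s) := fun h => pv_uni _ _ _ (by decide) q5 h
            have n9 : ¬ ((['n','i','n','e'] : List Char) <+: s) := fun h => pv_uni _ _ _ (by decide) q5 h
            simp [q1, q2, q4, q5, n6, n7, n8, n9]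
          · by_cases q6 : ((['s','i','x'] : List Char) <+: s)
            · have n7 : ¬ ((['s','e','v','e','n'] : List Char) <+: s) := fun h => pv_uni _ _ _ (by decide) q6 h
              have n8 : ¬ ((['e','i','g','h','t'] : List Char) <+: s) := fun h => pv_uni _ _ _ (by decide) q6 h
              have n9 : ¬ ((['n','i','n','e'] : List Char) <+: s) := fun h => pv_uni _ _ _ (by decide) q6 h
              simp [q1, q2, q6, n7, n8, n9]
            · by_cases q7 : ((['s','e','v','e','n'] : List Char) <+: s)
              · have n8 : ¬ ((['e','i','g','h','t'] : List Char) <+: s) := fun h => pv_uni _ _ _ (by decide) q7 h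
                have n9 : ¬ ((['n','i','n','e'] : List Char) <+: s) := fun h => pv_uni _ _ _ (by decide) q7 h
                simp [q1, q2, q3, q4, q5, q6, q7, n8, n9]
              · by_cases q8 : ((['e','i','g','h','t'] : List Char) <+: s)
                · have n9 : ¬ ((['n','i','n','e'] : List Char) <+: s) := fun h => pv_uni _ _ _ (by decide) q8 h
                  simp [q1, q2, q3, q4, q5, q6, q7, q8, n9]
                · by_cases q9 : ((['n','i','n','e'] : List Char) <+: s) <;>
                    simp [q1, q2, q3, q4, q5, q6, q7, q8, q9]

-- The emission sweep, driven by any lookup function agreeing with the one-pass match,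
-- is the one-pass emission.
lemma pv_emit (s : List Char) (g : Nat → Option Char)
    (hg : ∀ i, g i = pvFindB (s.drop i)) (out : List Char) :
    (List.range s.length).foldl
      (fun out i =>
        (match g i with | some d => out ++ [d] | none => out) ++
        (match s[i]? with | some c => [c] | none => []))
      out = out ++ pvLoopB s [] := by
  induction s generalizing g out with
  | nil => simp [pvLoopB]
  | cons c cs ih =>
    rw [List.length_cons, List.range_succ_eq_map, List.foldl_cons, List.foldl_map]
    have h0 : g 0 = pvFindB (c :: cs) := by simpa using hg 0
    simp only [Nat.succ_eq_add_one, List.getElem?_cons_succ, List.getElem?_cons_zero]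
    rw [ih (fun j => g (j + 1)) (fun i => by simpa using hg (i + 1))]
    conv_rhs => rw [pvLoopB]
    rw [pvLoopB_acc cs]
    cases hf : pvFindB (c :: cs) with
    | none => simp [h0, hf, pvLoopB_acc cs [c]]
    | some d => simp [h0, hf, pvLoopB_acc cs [d, c]]

-- ===== VERDICT =====
theorem convert_words_spec : Claim_equal_convert_words := by
  intro row _
  simp only [Spec_convert_words, convert_words, convert_words_alt]
  have hA := pv_main row.toList []
  simp only [List.nil_append, List.length_nil] at hA
  rw [hA]
  have hB := pv_emit row.toList (fun i => PySem.Dict.get? (pvBuildB row.toList) i)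
      (fun i => pv_lookup row.toList i) []
  simp only [List.nil_append] at hB
  rw [← hB]
  simp only [PySem.List.pyGet?_natCast]
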